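-- pv_equiv track=rewrite | github.com/reddevilmidzy/problem-solving | 백준/Platinum/23291. 어항 정리/어항 정리.py | rematch
-- ===== SOURCE A (Python) =====
-- def rematch(lis: list[list[int]]):
--     res = []
--
--     n,m = len(lis), len(lis[-1])
--     for j in range(m):
--         for i in range(n - 1, -1, -1):
--             if len(lis[i]) > j:
--                 res.append(lis[i][j])
--     return res
-- ===== SOURCE B (Python) =====
-- def rematch(lis: list[list[int]]):
--     m = len(lis[-1])
--     buckets = [[] for _ in range(m)]
--     for row in reversed(lis):
--         for j in range(min(len(row), m)):
--             buckets[j].append(row[j])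
--     out = []
--     for b in buckets:
--         out += b
--     return out
-- ===== Notes on version B (the rewrite author's own statement) =====
-- stated objective: alternative
-- what changed: A scans all rows once per column (column-outer, row-inner with repeated len checks); B makes a single bottom-to-top pass over the rows, distributing each row's first m entries into per-column bucket lists, and concatenates the buckets.
import Mathlib
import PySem

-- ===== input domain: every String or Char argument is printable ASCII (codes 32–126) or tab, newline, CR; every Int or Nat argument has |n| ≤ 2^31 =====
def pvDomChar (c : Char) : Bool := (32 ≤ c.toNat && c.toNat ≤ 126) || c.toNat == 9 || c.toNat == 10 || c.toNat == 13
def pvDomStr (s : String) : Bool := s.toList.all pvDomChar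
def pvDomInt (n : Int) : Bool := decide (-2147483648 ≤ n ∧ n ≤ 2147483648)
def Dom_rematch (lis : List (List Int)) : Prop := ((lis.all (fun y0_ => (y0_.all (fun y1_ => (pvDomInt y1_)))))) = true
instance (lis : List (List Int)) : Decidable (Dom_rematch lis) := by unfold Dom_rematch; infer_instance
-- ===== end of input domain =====

-- B flattens the jagged matrix column-wise by a single bottom-to-top distributing pass into per-column
-- buckets (then concatenates), instead of A's per-column rescans of all rows (objective: alternative).

-- ===== PORT A =====
-- for j in range(m): for i in range(n-1,-1,-1): if len(lis[i]) > j: res.append(lis[i][j])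
def rematch (lis : List (List Int)) : List Int :=
  let n : Int := PySem.List.len lis
  let m : Int := PySem.List.len (PySem.List.pyGetD lis (-1) [])
  (PySem.List.pyRange 0 m 1).foldl (fun res j =>
    (PySem.List.pyRange (n - 1) (-1) (-1)).foldl (fun res i =>
      if PySem.List.len (PySem.List.pyGetD lis i []) > j then
        res ++ [PySem.List.pyGetD (PySem.List.pyGetD lis i []) j 0]
      else res) res) []

-- ===== PORT B =====
-- inner loop 'for j in range(min(len(row), m)): buckets[j].append(row[j])':
-- appends row[j] (for each j < min(len row, m)) to bucket j, transcribed structurally on buckets / row.take m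
def addRow : List (List Int) → List Int → List (List Int)
  | bks, [] => bks
  | [], _ => []
  | b :: bs, x :: xs => (b ++ [x]) :: addRow bs xs

def rematch_alt (lis : List (List Int)) : List Int :=
  let m : Nat := (PySem.List.pyGetD lis (-1) []).length
  let buckets := lis.reverse.foldl (fun bks row => addRow bks (row.take m)) (List.replicate m [])
  buckets.foldl (fun out b => out ++ b) []

-- ===== PRECONDITION & SPEC =====
-- Python A evaluates lis[-1]: it raises IndexError exactly on the empty list (B does the same).
def Pre_rematch (lis : List (List Int)) : Prop := lis ≠ []
instance (lis : List (List Int)) : Decidable (Pre_rematch lis) := by unfold Pre_rematch; infer_instance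
def pvWitness_rematch : List (List Int) := [[1, 2], [3]]

def Spec_rematch (lis : List (List Int)) (out : List Int) : Prop := out = rematch_alt lis
instance (lis : List (List Int)) (out : List Int) : Decidable (Spec_rematch lis out) := by unfold Spec_rematch; infer_instance

-- ===== CLAIM (what is proved, stated in full; the proofs are below) =====
def Claim_equal_rematch : Prop := ∀ (lis : List (List Int)), Dom_rematch lis → Pre_rematch lis → Spec_rematch lis (rematch lis)

-- ===== LEMMAS AND PROOFS =====

-- the j-th column, rows already in bottom-to-top order
def colF (j : Nat) (ys : List (List Int)) : List Int := ys.filterMap (fun row => row[j]?)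

theorem colF_cons (j : Nat) (row : List Int) (ys : List (List Int)) :
    colF j (row :: ys) = row[j]?.toList ++ colF j ys := by
  simp only [colF, List.filterMap_cons]
  cases row[j]? <;> simp

theorem length_addRow (bks : List (List Int)) (xs : List Int) :
    (addRow bks xs).length = bks.length := by
  induction bks generalizing xs with
  | nil => cases xs <;> rfl
  | cons b bs ih => cases xs with
    | nil => rfl
    | cons x xs => simp [addRow, ih]

theorem addRow_getD (bks : List (List Int)) (xs : List Int) (j : Nat) (h : j < bks.length) :
    (addRow bks xs).getD j [] = bks.getD j [] ++ xs[j]?.toList := by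
  induction bks generalizing xs j with
  | nil => simp at h
  | cons b bs ih =>
    cases xs with
    | nil => simp [addRow]
    | cons x xs =>
      cases j with
      | zero => simp [addRow]
      | succ j => simpa [addRow] using ih xs j (by simpa using h)

theorem foldl_addRow (m : Nat) (ys bks : List (List Int)) (h : bks.length = m) :
    ys.foldl (fun b row => addRow b (row.take m)) bks
      = (List.range m).map (fun j => bks.getD j [] ++ colF j ys) := by
  induction ys generalizing bks with
  | nil =>
    subst h
    simp only [List.foldl_nil, colF, List.filterMap_nil, List.append_nil]
    apply List.ext_getElem (by simp)
    intro j h1 h2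
    simp [List.getD_eq_getElem?_getD, List.getElem?_eq_getElem h1]
  | cons row ys ih =>
    rw [List.foldl_cons, ih _ (by rw [length_addRow, h])]
    apply List.map_congr_left
    intro j hj
    rw [List.mem_range] at hj
    rw [addRow_getD bks _ j (by omega), List.getElem?_take_of_lt hj, colF_cons,
      List.append_assoc]

theorem foldl_append_flatten (l : List (List Int)) (init : List Int) :
    l.foldl (fun out b => out ++ b) init = init ++ l.flatten := by
  induction l generalizing init with
  | nil => simp
  | cons b l ih => simp [ih, List.append_assoc]

theorem rematch_alt_eq (lis : List (List Int)) :
    rematch_alt lis =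
      (List.range (PySem.List.pyGetD lis (-1) []).length).flatMap
        (fun j => colF j lis.reverse) := by
  show (lis.reverse.foldl
      (fun bks row => addRow bks (row.take (PySem.List.pyGetD lis (-1) []).length))
      (List.replicate (PySem.List.pyGetD lis (-1) []).length [])).foldl
      (fun out b => out ++ b) [] = _
  rw [foldl_addRow _ _ _ (List.length_replicate), foldl_append_flatten]
  simp [List.flatten_eq_flatMap, List.flatMap_map]

-- the inner countdown loop of A appends exactly column jn, rows bottom-to-top
theorem inner_loop (xs : List (List Int)) (jn : Nat) (res : List Int) :
    (PySem.List.pyRange ((xs.length : Int) - 1) (-1) (-1)).foldl (fun res i =>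
        if PySem.List.len (PySem.List.pyGetD xs i []) > (jn : Int) then
          res ++ [PySem.List.pyGetD (PySem.List.pyGetD xs i []) (jn : Int) 0]
        else res) res
      = res ++ colF jn xs.reverse := by
  induction xs using List.reverseRecOn generalizing res with
  | nil =>
    rw [PySem.List.pyRange_neg_one_eq_nil (by simp)]
    simp [colF]
  | append_singleton ys y ih =>
    have hlen : ((ys ++ [y]).length : Int) - 1 = (ys.length : Int) := by
      simp
    rw [hlen, PySem.List.pyRange_neg_one_cons (by omega), List.foldl_cons]
    have hy : PySem.List.pyGetD (ys ++ [y]) (ys.length : Int) [] = y := by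
      rw [PySem.List.pyGetD_natCast]
      simp [List.getD_eq_getElem?_getD]
    have hstep : (if PySem.List.len (PySem.List.pyGetD (ys ++ [y]) (ys.length : Int) []) > (jn : Int) then
          res ++ [PySem.List.pyGetD (PySem.List.pyGetD (ys ++ [y]) (ys.length : Int) []) (jn : Int) 0]
        else res) = res ++ y[jn]?.toList := by
      rw [hy]
      by_cases hj : jn < y.length
      · rw [if_pos (by simp only [PySem.List.len_eq, gt_iff_lt]; exact_mod_cast hj)]
        rw [PySem.List.pyGetD_natCast, List.getElem?_eq_getElem hj]
        simp [List.getD_eq_getElem?_getD, List.getElem?_eq_getElem hj]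
      · rw [if_neg (by simp only [PySem.List.len_eq]; omega)]
        rw [List.getElem?_eq_none (Nat.le_of_not_lt hj)]
        simp
    rw [hstep]
    have hcong : (PySem.List.pyRange ((ys.length : Int) - 1) (-1) (-1)).foldl (fun res i =>
          if PySem.List.len (PySem.List.pyGetD (ys ++ [y]) i []) > (jn : Int) then
            res ++ [PySem.List.pyGetD (PySem.List.pyGetD (ys ++ [y]) i []) (jn : Int) 0]
          else res) (res ++ y[jn]?.toList)
        = (PySem.List.pyRange ((ys.length : Int) - 1) (-1) (-1)).foldl (fun res i =>
          if PySem.List.len (PySem.List.pyGetD ys i []) > (jn : Int) then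
            res ++ [PySem.List.pyGetD (PySem.List.pyGetD ys i []) (jn : Int) 0]
          else res) (res ++ y[jn]?.toList) := by
      apply PySem.List.foldl_congr_mem
      intro acc i hi
      rw [PySem.List.mem_pyRange_neg_one] at hi
      have h1 : i.toNat < ys.length := by omega
      have hget : PySem.List.pyGetD (ys ++ [y]) i [] = PySem.List.pyGetD ys i [] := by
        rw [show i = ((i.toNat : Nat) : Int) by omega, PySem.List.pyGetD_natCast,
          PySem.List.pyGetD_natCast]
        simp [List.getD_eq_getElem?_getD, List.getElem?_append_left h1,
          List.getElem?_eq_getElem h1]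
      rw [hget]
    rw [hcong, ih]
    simp [colF_cons, List.append_assoc]

theorem rematch_eq (lis : List (List Int)) :
    rematch lis =
      (List.range (PySem.List.pyGetD lis (-1) []).length).flatMap
        (fun j => colF j lis.reverse) := by
  show (PySem.List.pyRange 0 (PySem.List.len (PySem.List.pyGetD lis (-1) [])) 1).foldl (fun res j =>
      (PySem.List.pyRange (PySem.List.len lis - 1) (-1) (-1)).foldl (fun res i =>
        if PySem.List.len (PySem.List.pyGetD lis i []) > j then
          res ++ [PySem.List.pyGetD (PySem.List.pyGetD lis i []) j 0]
        else res) res) [] = _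
  rw [PySem.List.len_eq, PySem.List.len_eq, PySem.List.pyRange_zero_natCast, List.foldl_map]
  refine Eq.trans (PySem.List.foldl_congr_mem _ _
    (fun acc jn => acc ++ colF jn lis.reverse) [] (fun acc jn _ => inner_loop lis jn acc)) ?_
  simpa using PySem.List.foldl_append_eq_flatMap
    (fun j => colF j lis.reverse) (List.range (PySem.List.pyGetD lis (-1) []).length) ([] : List Int)

-- ===== VERDICT (by name: the statement is the Claim_ definition above) =====
theorem rematch_spec : Claim_equal_rematch := by
  intro lis _ _
  unfold Spec_rematch
  rw [rematch_eq, rematch_alt_eq]
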